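-- pv_equiv track=rewrite | github.com/RenzeLou/AAAR-1.0 | subtask3_review/data_process.py | extract_all_tables
-- ===== SOURCE A (Python) =====
-- def extract_all_tables(tex_content:list):
--     '''
--     for loop every lines
--     get all the table data, namely:
--     lines between "\begin{table" and "\end{table"
--     '''
--     all_tables = []
--     for i, line in enumerate(tex_content):
--         if "\\begin{table" in line:
--             # go for the end of this table
--             table = []
--             table.append(line)
--             for j in range(i+1, len(tex_content)):
--                 table.append(tex_content[j])
--                 if "\\end{table" in tex_content[j]:
--                     break
--             # table_str = "".join(table)
--             # import pdb; pdb.set_trace()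
--             all_tables.append(table)
--     # import pdb; pdb.set_trace()
--     return all_tables
-- ===== SOURCE B (Python) =====
-- def extract_all_tables(tex_content: list):
--     begins = [i for i, line in enumerate(tex_content) if "\\begin{table" in line]
--     ends = [j for j, line in enumerate(tex_content) if "\\end{table" in line]
--     all_tables = []
--     p = 0
--     for i in begins:
--         while p < len(ends) and ends[p] <= i:
--             p += 1
--         if p < len(ends):
--             all_tables.append(tex_content[i:ends[p] + 1])
--         else:
--             all_tables.append(tex_content[i:])
--     return all_tables
-- ===== Notes on version B (the rewrite author's own statement) =====
-- stated objective: alternative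
-- what changed: Replaces the per-begin forward rescan with two index lists (begin lines, end lines) built in one pass and a monotone pointer into the sorted end-index list, emitting each table as a slice.
import Mathlib
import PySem

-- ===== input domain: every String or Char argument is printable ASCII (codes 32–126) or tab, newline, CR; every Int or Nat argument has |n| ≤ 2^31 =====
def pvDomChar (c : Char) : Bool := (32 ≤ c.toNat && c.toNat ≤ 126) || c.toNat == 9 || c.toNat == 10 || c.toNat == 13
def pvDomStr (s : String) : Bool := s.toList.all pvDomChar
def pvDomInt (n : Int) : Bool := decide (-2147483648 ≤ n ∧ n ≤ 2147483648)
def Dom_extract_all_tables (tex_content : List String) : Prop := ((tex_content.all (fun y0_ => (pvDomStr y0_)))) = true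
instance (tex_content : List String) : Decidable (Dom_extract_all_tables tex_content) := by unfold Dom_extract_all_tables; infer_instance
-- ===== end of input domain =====

-- B replaces A's per-begin forward rescan with two index lists and a monotone pointer into the sorted end-index list (return value only; no mutation).

-- shared marker tests ('"\begin{table" in line', '"\end{table" in line')
def hasBeg (s : String) : Bool := PySem.Str.isIn "\\begin{table" s
def hasEnd (s : String) : Bool := PySem.Str.isIn "\\end{table" s

-- ===== PORT A =====
-- inner 'for j in range(i+1, len(tex_content)): table.append(...); if end: break'
def innerA (tex : List String) (idxs : List Int) (table : List String) : List String :=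
  match idxs with
  | [] => table
  | j :: rest =>
    let table' := table ++ [PySem.List.pyGetD tex j ""]
    if hasEnd (PySem.List.pyGetD tex j "") then table'
    else innerA tex rest table'

def extract_all_tables (tex_content : List String) : List (List String) :=
  (PySem.List.enumerate tex_content 0).foldl
    (fun acc p =>
      if hasBeg p.2 then
        acc ++ [innerA tex_content (PySem.List.pyRange (p.1 + 1) (tex_content.length : Int) 1) [p.2]]
      else acc) []

-- ===== PORT B =====
-- the while-loop pointer into 'ends' is rendered as the remaining suffix of 'ends' (dropWhile = advancing p)
def goB (tex : List String) (begins ends : List Int) : List (List String) :=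
  match begins with
  | [] => []
  | i :: bs =>
    let ends' := ends.dropWhile (fun e => decide (e ≤ i))
    (match ends' with
     | e :: _ => PySem.List.slice tex (some i) (some (e + 1))
     | [] => PySem.List.slice tex (some i) none) :: goB tex bs ends'

def extract_all_tables_alt (tex_content : List String) : List (List String) :=
  let begins := ((PySem.List.enumerate tex_content 0).filter (fun p => hasBeg p.2)).map (·.1)
  let ends := ((PySem.List.enumerate tex_content 0).filter (fun p => hasEnd p.2)).map (·.1)
  goB tex_content begins ends

-- ===== PRECONDITION & SPEC =====
def Spec_extract_all_tables (tex_content : List String) (out : List (List String)) : Prop := out = extract_all_tables_alt tex_content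
instance (tex_content : List String) (out : List (List String)) : Decidable (Spec_extract_all_tables tex_content out) := by unfold Spec_extract_all_tables; infer_instance

-- ===== CLAIM (what is proved, stated in full; the proofs are below) =====
def Claim_equal_extract_all_tables : Prop := ∀ (tex_content : List String), Dom_extract_all_tables tex_content → Spec_extract_all_tables tex_content (extract_all_tables tex_content)

-- ===== LEMMAS AND PROOFS =====

-- proof-local abbreviations
def gIdx (tex : List String) (j : Int) : String := PySem.List.pyGetD tex j ""

def entryB (tex : List String) (ends' : List Int) (i : Int) : List String :=
  match ends' with
  | e :: _ => PySem.List.slice tex (some i) (some (e + 1))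
  | [] => PySem.List.slice tex (some i) none

theorem goB_cons (tex : List String) (i : Int) (bs ends : List Int) :
    goB tex (i :: bs) ends =
      entryB tex (ends.dropWhile (fun e => decide (e ≤ i))) i ::
        goB tex bs (ends.dropWhile (fun e => decide (e ≤ i))) := by
  simp only [goB, entryB]

theorem dropWhile_append_of_forall {α : Type} (p : α → Bool) (l1 l2 : List α)
    (h : ∀ x ∈ l1, p x = true) : (l1 ++ l2).dropWhile p = l2.dropWhile p := by
  induction l1 with
  | nil => rfl
  | cons a t ih =>
    simp only [List.cons_append, List.dropWhile_cons, h a (by simp)]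
    exact ih (fun x hx => h x (by simp [hx]))

theorem takeWhile_append_of_forall {α : Type} (p : α → Bool) (l1 l2 : List α)
    (h : ∀ x ∈ l1, p x = true) : (l1 ++ l2).takeWhile p = l1 ++ l2.takeWhile p := by
  induction l1 with
  | nil => rfl
  | cons a t ih =>
    simp only [List.cons_append, List.takeWhile_cons, h a (by simp)]
    simp [ih (fun x hx => h x (by simp [hx]))]

theorem dropWhile_eq_self_of_forall {α : Type} (p : α → Bool) (l : List α)
    (h : ∀ x ∈ l, p x = false) : l.dropWhile p = l := by
  cases l with
  | nil => rfl
  | cons a t => simp [h a (by simp)]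

theorem dropWhile_dropWhile {α : Type} (p q : α → Bool) (l : List α)
    (h : ∀ x, q x = true → p x = true) : (l.dropWhile q).dropWhile p = l.dropWhile p := by
  induction l with
  | nil => rfl
  | cons a t ih =>
    by_cases hq : q a = true
    · simp [hq, h a hq, ih]
    · simp [List.dropWhile_cons, Bool.eq_false_iff.mpr hq]

theorem enumerate_eq_map (xs : List String) :
    PySem.List.enumerate xs (0 : Int) =
      (PySem.List.pyRange 0 (xs.length : Int) 1).map (fun j => (j, gIdx xs j)) := by
  apply List.ext_getElem
  · simp [PySem.List.length_enumerate, PySem.List.length_pyRange_one]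
  · intro k h1 h2
    have hk : k < xs.length := by
      simpa [PySem.List.length_enumerate] using h1
    simp only [PySem.List.getElem_enumerate, List.getElem_map, PySem.List.getElem_pyRange_one]
    have hg : gIdx xs ((0 : Int) + (k : Int)) = xs[k] := by
      rw [gIdx, show (0 : Int) + (k : Int) = ((k : Nat) : Int) by omega,
        PySem.List.pyGetD_natCast]
      exact List.getD_eq_getElem xs "" hk
    rw [hg]

-- goB with the evolving ends-suffix equals, pointwise, dropWhile on the ORIGINAL ends
theorem goB_eq (tex : List String) (begins : List Int) :
    ∀ ends : List Int, begins.Pairwise (· < ·) →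
      goB tex begins ends =
        begins.map (fun i => entryB tex (ends.dropWhile (fun e => decide (e ≤ i))) i) := by
  induction begins with
  | nil => intro ends _; rfl
  | cons i bs ih =>
    intro ends hp
    rw [goB_cons, List.map_cons]
    have hlt := (List.pairwise_cons.mp hp).1
    rw [ih _ (List.pairwise_cons.mp hp).2]
    congr 1
    apply List.map_congr_left
    intro i' hi'
    congr 1
    exact dropWhile_dropWhile _ _ ends
      (fun x hx => by
        have := hlt i' hi'
        simp only [decide_eq_true_eq] at *
        omega)

-- characterisation of A's inner break-loop
theorem innerA_char (tex : List String) :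
    ∀ (idxs : List Int) (table : List String),
      innerA tex idxs table =
        table ++ ((idxs.takeWhile (fun j => !hasEnd (gIdx tex j))) ++
          (idxs.dropWhile (fun j => !hasEnd (gIdx tex j))).take 1).map (gIdx tex) := by
  intro idxs
  induction idxs with
  | nil => intro table; simp [innerA]
  | cons j rest ih =>
    intro table
    by_cases h : hasEnd (gIdx tex j) = true
    · simp [innerA, gIdx] at h ⊢
      simp [h, gIdx]
    · have h' : hasEnd (gIdx tex j) = false := Bool.eq_false_iff.mpr h
      simp only [innerA, gIdx] at h' ⊢
      rw [if_neg (by simp [h']), ih]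
      simp [h', gIdx]

theorem ends_dropWhile (tex : List String) (i : Int) (h0 : 0 ≤ i) (hn : i < (tex.length : Int)) :
    (((PySem.List.pyRange 0 (tex.length : Int) 1).filter (fun j => hasEnd (gIdx tex j))).dropWhile
        (fun e => decide (e ≤ i))) =
      (PySem.List.pyRange (i + 1) (tex.length : Int) 1).filter (fun j => hasEnd (gIdx tex j)) := by
  rw [PySem.List.pyRange_one_append 0 (i + 1) (tex.length : Int) (by omega) (by omega),
    List.filter_append,
    dropWhile_append_of_forall _ _ _ (fun x hx => by
      have := (PySem.List.mem_pyRange_one.mp (List.mem_of_mem_filter hx)).2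
      simp only [decide_eq_true_eq]; omega)]
  exact dropWhile_eq_self_of_forall _ _ (fun x hx => by
    have := (PySem.List.mem_pyRange_one.mp (List.mem_of_mem_filter hx)).1
    simp only [decide_eq_false_iff_not]; omega)

theorem entry_eq (tex : List String) (i : Int) (h0 : 0 ≤ i) (hn : i < (tex.length : Int)) :
    innerA tex (PySem.List.pyRange (i + 1) (tex.length : Int) 1) [gIdx tex i] =
      entryB tex ((PySem.List.pyRange (i + 1) (tex.length : Int) 1).filter
        (fun j => hasEnd (gIdx tex j))) i := by
  have hiN : i.toNat < tex.length := by omega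
  have hgi : gIdx tex i = tex[i.toNat] := PySem.List.pyGetD_eq_getElem tex "" h0 (by simpa using hn)
  have hdropi : tex.drop i.toNat = tex[i.toNat] :: tex.drop (i.toNat + 1) :=
    List.drop_eq_getElem_cons hiN
  have hone : ((i : Int) + 1).toNat = i.toNat + 1 := by omega
  have hmapfull : (PySem.List.pyRange (i + 1) (tex.length : Int) 1).map (gIdx tex) =
      tex.drop (i.toNat + 1) := by
    have := PySem.List.map_pyGetD_pyRange' tex "" (a := i + 1) (by omega)
    simpa [gIdx, hone] using this
  rw [innerA_char]
  cases h : (PySem.List.pyRange (i + 1) (tex.length : Int) 1).filter (fun j => hasEnd (gIdx tex j)) with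
  | nil =>
    have hall : ∀ j ∈ PySem.List.pyRange (i + 1) (tex.length : Int) 1,
        (fun j => !hasEnd (gIdx tex j)) j = true := by
      intro j hj
      have := List.filter_eq_nil_iff.mp h j hj
      simp at this ⊢
      exact this
    rw [List.takeWhile_eq_self_iff.mpr hall, List.dropWhile_eq_nil_iff.mpr (fun x hx => hall x hx)]
    simp only [entryB, List.append_nil, List.take_nil]
    rw [PySem.List.slice_from tex h0, hdropi, ← hmapfull]
    simp [hgi]
  | cons e rest =>
    have heF : e ∈ (PySem.List.pyRange (i + 1) (tex.length : Int) 1).filter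
        (fun j => hasEnd (gIdx tex j)) := by rw [h]; exact List.mem_cons_self
    have heR := PySem.List.mem_pyRange_one.mp (List.mem_of_mem_filter heF)
    have heQ : hasEnd (gIdx tex e) = true := by
      have := List.of_mem_filter heF; simpa using this
    have hsplit : PySem.List.pyRange (i + 1) (tex.length : Int) 1 =
        PySem.List.pyRange (i + 1) e 1 ++ PySem.List.pyRange e (tex.length : Int) 1 :=
      PySem.List.pyRange_one_append _ _ _ (by omega) (by omega)
    -- no end marker strictly between i and e
    have hpre : (PySem.List.pyRange (i + 1) e 1).filter (fun j => hasEnd (gIdx tex j)) = [] := by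
      cases hc : (PySem.List.pyRange (i + 1) e 1).filter (fun j => hasEnd (gIdx tex j)) with
      | nil => rfl
      | cons c t =>
        exfalso
        have hce : c = e := by
          have : c :: (t ++ (PySem.List.pyRange e (tex.length : Int) 1).filter
              (fun j => hasEnd (gIdx tex j))) = e :: rest := by
            rw [← List.cons_append, ← hc, ← List.filter_append, ← hsplit, h]
          exact (List.cons.injEq _ _ _ _).mp this |>.1
        have hcm : c ∈ PySem.List.pyRange (i + 1) e 1 :=
          List.mem_of_mem_filter (by rw [hc]; exact List.mem_cons_self)
        have := (PySem.List.mem_pyRange_one.mp hcm).2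
        omega
    have hpreAll : ∀ x ∈ PySem.List.pyRange (i + 1) e 1, (!hasEnd (gIdx tex x)) = true := by
      intro x hx
      have := List.filter_eq_nil_iff.mp hpre x hx
      simp at this ⊢
      exact this
    have hcons : PySem.List.pyRange e (tex.length : Int) 1 =
        e :: PySem.List.pyRange (e + 1) (tex.length : Int) 1 :=
      PySem.List.pyRange_one_cons (by omega)
    have htw : (PySem.List.pyRange (i + 1) (tex.length : Int) 1).takeWhile
        (fun j => !hasEnd (gIdx tex j)) = PySem.List.pyRange (i + 1) e 1 := by
      rw [hsplit, takeWhile_append_of_forall _ _ _ hpreAll, hcons]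
      simp [heQ]
    have hdw : (PySem.List.pyRange (i + 1) (tex.length : Int) 1).dropWhile
        (fun j => !hasEnd (gIdx tex j)) = e :: PySem.List.pyRange (e + 1) (tex.length : Int) 1 := by
      rw [hsplit, dropWhile_append_of_forall _ _ _ hpreAll, hcons]
      simp [heQ]
    rw [htw, hdw]
    have hrange : PySem.List.pyRange (i + 1) e 1 ++ [e] = PySem.List.pyRange (i + 1) (e + 1) 1 :=
      (PySem.List.pyRange_one_succ_right (by omega)).symm
    have ht1 : (e :: PySem.List.pyRange (e + 1) (tex.length : Int) 1).take 1 = [e] := rfl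
    rw [ht1, hrange]
    -- B side
    have hd : ((e : Int) + 1).toNat - i.toNat = (e - i).toNat + 1 := by omega
    have hmappart : (PySem.List.pyRange (i + 1) (e + 1) 1).map (gIdx tex) =
        (tex.drop (i.toNat + 1)).take ((e - i).toNat) := by
      have hsplit2 : PySem.List.pyRange (i + 1) (tex.length : Int) 1 =
          PySem.List.pyRange (i + 1) (e + 1) 1 ++ PySem.List.pyRange (e + 1) (tex.length : Int) 1 :=
        PySem.List.pyRange_one_append _ _ _ (by omega) (by omega)
      have hlen : (e - i).toNat = ((PySem.List.pyRange (i + 1) (e + 1) 1).map (gIdx tex)).length := by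
        simp [PySem.List.length_pyRange_one]
      rw [← hmapfull, hsplit2, List.map_append, hlen, List.take_left]
    simp only [entryB]
    rw [PySem.List.slice_toNat tex h0 (by omega), hdropi, hd, List.take_succ_cons,
      ← hmappart, ← hgi, List.singleton_append]

-- ===== VERDICT (by name: the statement is the Claim_ definition above) =====
theorem extract_all_tables_spec : Claim_equal_extract_all_tables := by
  intro tex _
  show extract_all_tables tex = extract_all_tables_alt tex
  have hA : extract_all_tables tex =
      ((PySem.List.pyRange 0 (tex.length : Int) 1).filter (fun j => hasBeg (gIdx tex j))).map
        (fun j => innerA tex (PySem.List.pyRange (j + 1) (tex.length : Int) 1) [gIdx tex j]) := by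
    unfold extract_all_tables
    rw [PySem.List.foldl_append_if, enumerate_eq_map, List.filter_map, List.map_map]
    simp [Function.comp_def]
  have hB : extract_all_tables_alt tex =
      goB tex ((PySem.List.pyRange 0 (tex.length : Int) 1).filter (fun j => hasBeg (gIdx tex j)))
        ((PySem.List.pyRange 0 (tex.length : Int) 1).filter (fun j => hasEnd (gIdx tex j))) := by
    unfold extract_all_tables_alt
    rw [enumerate_eq_map, List.filter_map, List.filter_map, List.map_map, List.map_map]
    simp [Function.comp_def]
  rw [hA, hB,
    goB_eq tex _ _ ((PySem.List.pairwise_lt_pyRange_one 0 (tex.length : Int)).filter _)]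
  apply List.map_congr_left
  intro i hi
  have him := PySem.List.mem_pyRange_one.mp (List.mem_of_mem_filter hi)
  rw [ends_dropWhile tex i him.1 him.2, entry_eq tex i him.1 him.2]
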